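-- pv_equiv track=rewrite | github.com/holbizmetrics/prime-alphabet-finder | dimensional_analysis.py | project_2d_ulam
-- ===== SOURCE A (Python) =====
-- from typing import Dict, List, Tuple, Optional
--
-- def project_2d_ulam(primes: List[int], limit: int) -> List[Tuple[int, int]]:
--     """Project primes onto Ulam spiral coordinates."""
--     # Generate Ulam spiral positions for numbers 1 to limit
--     positions = {}
--     x, y = 0, 0
--     dx, dy = 1, 0  # Start moving right
--     positions[1] = (x, y)
--
--     for n in range(2, limit + 1):
--         x, y = x + dx, y + dy
--         positions[n] = (x, y)
--
--         # Turn left if the cell to the left is empty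
--         new_dx, new_dy = -dy, dx  # Turn left
--         if (x + new_dx, y + new_dy) not in [(positions[i]) for i in range(1, n)]:
--             dx, dy = new_dx, new_dy
--
--     # Return positions of primes
--     return [positions.get(p, (0, 0)) for p in primes if p in positions]
-- ===== SOURCE B (Python) =====
-- def project_2d_ulam(primes, limit):
--     """Project primes onto Ulam spiral coordinates (staged: legs -> prefix sums -> index)."""
--     DIRS = [(1, 0), (0, 1), (-1, 0), (0, -1)]
--     # stage 1: the spiral's step directions, emitted leg by leg
--     # (leg j has length j//2 + 1 and direction DIRS[j % 4]: 1,1,2,2,3,3,... CCW)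
--     need = max(limit - 1, 0)
--     steps = []
--     j = 0
--     while need > 0:
--         take = min(j // 2 + 1, need)
--         steps += [DIRS[j % 4]] * take
--         need -= take
--         j += 1
--     # stage 2: prefix-sum the steps into the coordinates of 1..limit
--     coords = [(0, 0)]
--     for dx, dy in steps:
--         x, y = coords[-1]
--         coords.append((x + dx, y + dy))
--     # stage 3: index coordinates by the number they belong to
--     positions = {i: c for i, c in enumerate(coords, 1)}
--     return [positions[p] for p in primes if p in positions]
-- ===== Notes on version B (the rewrite author's own statement) =====
-- stated objective: faster
-- what changed: B replaces A's single occupancy-driven walk (which rebuilds and scans the list of all visited cells at every step to decide whether to turn) by three staged passes with no membership test at all: generate the spiral's direction steps leg by leg from the closed-form schedule (leg j has length j//2+1, direction cycling CCW), prefix-sum them into coordinates, and index the coordinates by number with enumerate.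
import Mathlib
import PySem

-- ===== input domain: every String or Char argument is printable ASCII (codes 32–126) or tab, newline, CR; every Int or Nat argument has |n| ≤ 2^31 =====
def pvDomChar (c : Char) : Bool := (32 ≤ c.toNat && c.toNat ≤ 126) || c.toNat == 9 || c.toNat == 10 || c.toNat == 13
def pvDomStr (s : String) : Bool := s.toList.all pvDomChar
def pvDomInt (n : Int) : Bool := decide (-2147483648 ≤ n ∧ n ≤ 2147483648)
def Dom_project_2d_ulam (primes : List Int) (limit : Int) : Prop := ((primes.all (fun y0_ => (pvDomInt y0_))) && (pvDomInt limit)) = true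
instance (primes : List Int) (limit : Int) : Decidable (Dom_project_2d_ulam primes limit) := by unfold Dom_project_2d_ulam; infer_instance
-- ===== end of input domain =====

-- B replaces A's occupancy-scan walk by three staged passes — schedule-generated direction
-- steps (legs 1,1,2,2,3,3,… turning CCW), prefix sums, index by enumerate: asymptotically faster.

-- ===== PORT A =====
-- loop state of A: (positions, x, y, dx, dy)
abbrev StA := PySem.Dict Int (Int × Int) × Int × Int × Int × Int

-- [(positions[i]) for i in range(1, n)] ; the keys 1..n-1 are always present, so the
-- .getD (0,0) default on the Option is unreachable (positions[i] never raises KeyError)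
def valsUpTo (n : Int) (d : PySem.Dict Int (Int × Int)) : List (Int × Int) :=
  (PySem.List.pyRange 1 n 1).map (fun i => ((d.get? i).getD (0, 0)))

-- one iteration of A's 'for n in range(2, limit + 1)'
def stepA (s : StA) (n : Int) : StA :=
  match s with
  | (positions, x, y, dx, dy) =>
    let x := x + dx
    let y := y + dy
    let positions := positions.insert n (x, y)
    let ndx := -dy
    let ndy := dx
    if (valsUpTo n positions).contains (x + ndx, y + ndy) then
      (positions, x, y, dx, dy)        -- cell to the left occupied: keep direction
    else
      (positions, x, y, ndx, ndy)      -- 'not in': turn left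

-- positions = {}; x,y = 0,0; dx,dy = 1,0; positions[1] = (0,0)
def initA : StA := ((PySem.Dict.empty : PySem.Dict Int (Int × Int)).insert 1 (0, 0), 0, 0, 1, 0)

def project_2d_ulam (primes : List Int) (limit : Int) : List (Int × Int) :=
  let st := (PySem.List.pyRange 2 (limit + 1) 1).foldl stepA initA
  let positions := st.1
  (primes.filter (fun p => positions.contains p)).map (fun p => positions.getD p (0, 0))

-- ===== PORT B =====
-- DIRS = [(1,0),(0,1),(-1,0),(0,-1)]
def pvDirs : List (Int × Int) := [(1, 0), (0, 1), (-1, 0), (0, -1)]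

-- stage 1, the 'while need > 0' loop emitting whole legs: leg j contributes
-- min(j//2+1, need) copies of DIRS[j % 4]; fuel makes the while loop total
-- (fuel = need suffices: every iteration emits at least one step)
def buildSteps : Nat → Nat → Nat → List (Int × Int)
  | 0, _, _ => []
  | fuel + 1, j, need =>
    if need = 0 then []
    else
      List.replicate (min (j / 2 + 1) need) (pvDirs.getD (j % 4) (0, 0)) ++
        buildSteps fuel (j + 1) (need - min (j / 2 + 1) need)

def project_2d_ulam_alt (primes : List Int) (limit : Int) : List (Int × Int) :=
  -- need = max(limit - 1, 0)
  let steps := buildSteps (limit - 1).toNat 0 (limit - 1).toNat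
  -- stage 2: the append-to-coords loop is exactly List.scanl of (+) over the steps
  let coords := List.scanl (fun p q => (p.1 + q.1, p.2 + q.2)) ((0, 0) : Int × Int) steps
  -- stage 3: positions = {i: c for i, c in enumerate(coords, 1)}
  let positions := (PySem.List.enumerate coords 1).foldl (fun d p => d.insert p.1 p.2)
    (PySem.Dict.empty : PySem.Dict Int (Int × Int))
  -- positions[p] raises KeyError only when p is missing, which the filter rules out
  (primes.filter (fun p => positions.contains p)).map (fun p => (positions.get? p).getD (0, 0))

-- ===== PRECONDITION & SPEC =====
def Spec_project_2d_ulam (primes : List Int) (limit : Int) (out : List (Int × Int)) : Prop := out = project_2d_ulam_alt primes limit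
instance (primes : List Int) (limit : Int) (out : List (Int × Int)) : Decidable (Spec_project_2d_ulam primes limit out) := by unfold Spec_project_2d_ulam; infer_instance

-- ===== CLAIM (what is proved, stated in full; the proofs are below) =====
def Claim_equal_project_2d_ulam : Prop := ∀ (primes : List Int) (limit : Int), Dom_project_2d_ulam primes limit → Spec_project_2d_ulam primes limit (project_2d_ulam primes limit)

-- ===== LEMMAS AND PROOFS =====

-- ---- a ghost per-step schedule walker (proof-only): mediates between A's occupancy
-- ---- walk and B's staged construction. State: (positions, x, y, dx, dy, segLen, rem, turns)
abbrev StB := PySem.Dict Int (Int × Int) × Int × Int × Int × Int × Int × Int × Int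

def stepB (s : StB) (n : Int) : StB :=
  match s with
  | (positions, x, y, dx, dy, segLen, rem, turns) =>
    let x := x + dx
    let y := y + dy
    let positions := positions.insert n (x, y)
    let rem := rem - 1
    if rem == 0 then
      let ndx := -dy
      let ndy := dx
      let turns := turns + 1
      let segLen := if PySem.Int.mod turns 2 == 0 then segLen + 1 else segLen
      (positions, x, y, ndx, ndy, segLen, segLen, turns)
    else
      (positions, x, y, dx, dy, segLen, rem, turns)

def initB : StB := ((PySem.Dict.empty : PySem.Dict Int (Int × Int)).insert 1 (0, 0), 0, 0, 1, 0, 1, 1, 0)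

-- "cell p lies strictly ahead of the head (x,y) along direction (dx,dy)"
def Ahead (x y dx dy px py : Int) : Prop :=
  (dx = 1 ∧ dy = 0 ∧ py = y ∧ x < px) ∨
  (dx = 0 ∧ dy = 1 ∧ px = x ∧ y < py) ∨
  (dx = -1 ∧ dy = 0 ∧ py = y ∧ px < x) ∨
  (dx = 0 ∧ dy = -1 ∧ px = x ∧ py < y)

-- Joint loop invariant after having processed number n: A's state and the ghost state share
-- the dict, head and direction; the visited cells are exactly a bounding box minus the cells
-- strictly ahead of the head; the ghost counters measure distances to the box edges.
def LoopInv (n : Int) (sA : StA) (sB : StB) : Prop :=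
  match sA, sB with
  | (dA, xA, yA, dxA, dyA), (d, x, y, dx, dy, segLen, rem, turns) =>
    dA = d ∧ xA = x ∧ yA = y ∧ dxA = dx ∧ dyA = dy ∧ 1 ≤ n ∧
    ∃ lox hix loy hiy : Int,
      lox ≤ x ∧ x ≤ hix ∧ loy ≤ y ∧ y ≤ hiy ∧
      1 ≤ rem ∧ rem ≤ segLen ∧ 0 ≤ turns ∧
      ((dx = 1 ∧ dy = 0 ∧ hix - lox + 1 = segLen ∧ hiy - loy + 1 = segLen ∧ y = loy ∧ rem = hix - x + 1 ∧ turns % 2 = 0) ∨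
       (dx = 0 ∧ dy = 1 ∧ hix - lox + 1 = segLen + 1 ∧ hiy - loy + 1 = segLen ∧ x = hix ∧ rem = hiy - y + 1 ∧ turns % 2 = 1) ∨
       (dx = -1 ∧ dy = 0 ∧ hix - lox + 1 = segLen ∧ hiy - loy + 1 = segLen ∧ y = hiy ∧ rem = x - lox + 1 ∧ turns % 2 = 0) ∨
       (dx = 0 ∧ dy = -1 ∧ hix - lox + 1 = segLen + 1 ∧ hiy - loy + 1 = segLen ∧ x = lox ∧ rem = y - loy + 1 ∧ turns % 2 = 1)) ∧
      (∀ px py : Int, ((px, py) ∈ valsUpTo (n + 1) d ↔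
        (lox ≤ px ∧ px ≤ hix ∧ loy ≤ py ∧ py ≤ hiy ∧ ¬ Ahead x y dx dy px py)))

lemma valsUpTo_insert_high (d : PySem.Dict Int (Int × Int)) (n k : Int) (v : Int × Int)
    (hk : n ≤ k) : valsUpTo n (d.insert k v) = valsUpTo n d := by
  unfold valsUpTo
  apply List.map_congr_left
  intro i hi
  rw [PySem.List.mem_pyRange_one] at hi
  rw [PySem.Dict.get?_insert_of_ne d v (by omega)]

lemma valsUpTo_succ (d : PySem.Dict Int (Int × Int)) (n : Int) (v : Int × Int)
    (hn : 1 ≤ n) (hv : d.get? n = some v) : valsUpTo (n + 1) d = valsUpTo n d ++ [v] := by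
  unfold valsUpTo
  rw [PySem.List.pyRange_one_succ_right hn, List.map_append]
  simp [hv]

lemma LoopInv_dict_eq (n : Int) (sA : StA) (sB : StB) (h : LoopInv n sA sB) : sA.1 = sB.1 := by
  obtain ⟨dA, xA, yA, dxA, dyA⟩ := sA
  obtain ⟨d, x, y, dx, dy, segLen, rem, turns⟩ := sB
  exact h.1

lemma init_inv : LoopInv 1 initA initB := by
  refine ⟨rfl, rfl, rfl, rfl, rfl, le_refl 1, 0, 0, 0, 0, by omega, by omega, by omega,
    by omega, by omega, by omega, by omega, Or.inl (by omega), ?_⟩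
  intro px py
  have h2 : valsUpTo 2 ((PySem.Dict.empty : PySem.Dict Int (Int × Int)).insert 1 (0, 0)) = [(0, 0)] := by decide
  rw [show ((1 : Int) + 1) = 2 by omega, h2]
  simp only [List.mem_singleton, Prod.mk.injEq, Ahead]
  constructor
  · rintro ⟨h1, h2⟩; omega
  · rintro ⟨a, b, c, d, e⟩; omega

lemma step_inv (m : Int) (sA : StA) (sB : StB) (h : LoopInv (m - 1) sA sB) :
    LoopInv m (stepA sA m) (stepB sB m) := by
  obtain ⟨dA, xA, yA, dxA, dyA⟩ := sA
  obtain ⟨d, x, y, dx, dy, segLen, rem, turns⟩ := sB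
  obtain ⟨h1, h2, h3, h4, h5, hn, lox, hix, loy, hiy, hx1, hx2, hy1, hy2, hr1, hr2, ht0, hdir, hmem⟩ := h
  subst h1; subst h2; subst h3; subst h4; subst h5
  have hm1 : m - 1 + 1 = m := by omega
  rw [hm1] at hmem
  have hm2 : (1 : Int) ≤ m := by omega
  simp only [stepA, stepB]
  rw [valsUpTo_insert_high _ m m _ le_rfl]
  have hget : (dA.insert m (xA + dxA, yA + dyA)).get? m = some (xA + dxA, yA + dyA) :=
    PySem.Dict.get?_insert_self _ _ _
  have hmod : PySem.Int.mod (turns + 1) 2 = (turns + 1) % 2 :=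
    PySem.Int.mod_eq_emod_of_pos (by norm_num)
  rcases hdir with ⟨hdx, hdy, hW, hH, hyl, hrr, hpar⟩ | ⟨hdx, hdy, hW, hH, hyl, hrr, hpar⟩ |
    ⟨hdx, hdy, hW, hH, hyl, hrr, hpar⟩ | ⟨hdx, hdy, hW, hH, hyl, hrr, hpar⟩ <;> subst hdx <;> subst hdy <;>
    by_cases hrem : rem = 1
  -- ===== direction (1,0), rem = 1 : turn right→up =====
  · have hc : ¬ ((valsUpTo m dA).contains (xA + 1 + -0, yA + 0 + 1) = true) := by
      simp only [List.contains_iff_mem, hmem]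
      simp only [Ahead]; norm_num; try omega
    rw [if_neg hc]
    have hb : ((rem - 1 == (0 : Int)) = true) := by simp only [beq_iff_eq]; omega
    rw [if_pos hb]
    have hL : ((PySem.Int.mod (turns + 1) 2 == (0 : Int)) = false) := by
      rw [hmod]; simp only [beq_eq_false_iff_ne, ne_eq]; omega
    rw [hL]
    simp only [Bool.false_eq_true, if_false]
    refine ⟨rfl, rfl, rfl, by omega, by omega, by omega, lox, hix + 1, loy, hiy,
      by omega, by omega, by omega, by omega, by omega, by omega, by omega,
      Or.inr (Or.inl (by omega)), ?_⟩
    intro px py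
    rw [valsUpTo_succ _ m _ hm2 hget, valsUpTo_insert_high _ m m _ le_rfl]
    simp only [List.mem_append, List.mem_singleton, Prod.mk.injEq, hmem]
    simp only [Ahead]; norm_num; try omega
  -- ===== direction (1,0), rem ≥ 2 : keep going right =====
  · have hc : ((valsUpTo m dA).contains (xA + 1 + -0, yA + 0 + 1) = true) := by
      simp only [List.contains_iff_mem, hmem]
      refine ⟨by omega, by omega, by omega, by omega, ?_⟩
      simp only [Ahead]; norm_num; try omega
    rw [if_pos hc]
    have hb : ((rem - 1 == (0 : Int)) = false) := by simp only [beq_eq_false_iff_ne, ne_eq]; omega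
    rw [hb]
    simp only [Bool.false_eq_true, if_false]
    refine ⟨rfl, rfl, rfl, rfl, rfl, by omega, lox, hix, loy, hiy,
      by omega, by omega, by omega, by omega, by omega, by omega, by omega,
      Or.inl (by omega), ?_⟩
    intro px py
    rw [valsUpTo_succ _ m _ hm2 hget, valsUpTo_insert_high _ m m _ le_rfl]
    simp only [List.mem_append, List.mem_singleton, Prod.mk.injEq, hmem]
    simp only [Ahead]; norm_num; try omega
  -- ===== direction (0,1), rem = 1 : turn up→left (leg grows) =====
  · have hc : ¬ ((valsUpTo m dA).contains (xA + 0 + -1, yA + 1 + 0) = true) := by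
      simp only [List.contains_iff_mem, hmem]
      simp only [Ahead]; norm_num; try omega
    rw [if_neg hc]
    have hb : ((rem - 1 == (0 : Int)) = true) := by simp only [beq_iff_eq]; omega
    rw [if_pos hb]
    have hL : ((PySem.Int.mod (turns + 1) 2 == (0 : Int)) = true) := by
      rw [hmod]; simp only [beq_iff_eq]; omega
    rw [hL]
    simp only [if_true]
    refine ⟨rfl, rfl, rfl, by omega, by omega, by omega, lox, hix, loy, hiy + 1,
      by omega, by omega, by omega, by omega, by omega, by omega, by omega,
      Or.inr (Or.inr (Or.inl (by omega))), ?_⟩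
    intro px py
    rw [valsUpTo_succ _ m _ hm2 hget, valsUpTo_insert_high _ m m _ le_rfl]
    simp only [List.mem_append, List.mem_singleton, Prod.mk.injEq, hmem]
    simp only [Ahead]; norm_num; try omega
  -- ===== direction (0,1), rem ≥ 2 : keep going up =====
  · have hc : ((valsUpTo m dA).contains (xA + 0 + -1, yA + 1 + 0) = true) := by
      simp only [List.contains_iff_mem, hmem]
      refine ⟨by omega, by omega, by omega, by omega, ?_⟩
      simp only [Ahead]; norm_num; try omega
    rw [if_pos hc]
    have hb : ((rem - 1 == (0 : Int)) = false) := by simp only [beq_eq_false_iff_ne, ne_eq]; omega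
    rw [hb]
    simp only [Bool.false_eq_true, if_false]
    refine ⟨rfl, rfl, rfl, rfl, rfl, by omega, lox, hix, loy, hiy,
      by omega, by omega, by omega, by omega, by omega, by omega, by omega,
      Or.inr (Or.inl (by omega)), ?_⟩
    intro px py
    rw [valsUpTo_succ _ m _ hm2 hget, valsUpTo_insert_high _ m m _ le_rfl]
    simp only [List.mem_append, List.mem_singleton, Prod.mk.injEq, hmem]
    simp only [Ahead]; norm_num; try omega
  -- ===== direction (-1,0), rem = 1 : turn left→down =====
  · have hc : ¬ ((valsUpTo m dA).contains (xA + -1 + -0, yA + 0 + -1) = true) := by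
      simp only [List.contains_iff_mem, hmem]
      simp only [Ahead]; norm_num; try omega
    rw [if_neg hc]
    have hb : ((rem - 1 == (0 : Int)) = true) := by simp only [beq_iff_eq]; omega
    rw [if_pos hb]
    have hL : ((PySem.Int.mod (turns + 1) 2 == (0 : Int)) = false) := by
      rw [hmod]; simp only [beq_eq_false_iff_ne, ne_eq]; omega
    rw [hL]
    simp only [Bool.false_eq_true, if_false]
    refine ⟨rfl, rfl, rfl, by omega, by omega, by omega, lox - 1, hix, loy, hiy,
      by omega, by omega, by omega, by omega, by omega, by omega, by omega,
      Or.inr (Or.inr (Or.inr (by omega))), ?_⟩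
    intro px py
    rw [valsUpTo_succ _ m _ hm2 hget, valsUpTo_insert_high _ m m _ le_rfl]
    simp only [List.mem_append, List.mem_singleton, Prod.mk.injEq, hmem]
    simp only [Ahead]; norm_num; try omega
  -- ===== direction (-1,0), rem ≥ 2 : keep going left =====
  · have hc : ((valsUpTo m dA).contains (xA + -1 + -0, yA + 0 + -1) = true) := by
      simp only [List.contains_iff_mem, hmem]
      refine ⟨by omega, by omega, by omega, by omega, ?_⟩
      simp only [Ahead]; norm_num; try omega
    rw [if_pos hc]
    have hb : ((rem - 1 == (0 : Int)) = false) := by simp only [beq_eq_false_iff_ne, ne_eq]; omega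
    rw [hb]
    simp only [Bool.false_eq_true, if_false]
    refine ⟨rfl, rfl, rfl, rfl, rfl, by omega, lox, hix, loy, hiy,
      by omega, by omega, by omega, by omega, by omega, by omega, by omega,
      Or.inr (Or.inr (Or.inl (by omega))), ?_⟩
    intro px py
    rw [valsUpTo_succ _ m _ hm2 hget, valsUpTo_insert_high _ m m _ le_rfl]
    simp only [List.mem_append, List.mem_singleton, Prod.mk.injEq, hmem]
    simp only [Ahead]; norm_num; try omega
  -- ===== direction (0,-1), rem = 1 : turn down→right (leg grows) =====
  · have hc : ¬ ((valsUpTo m dA).contains (xA + 0 + - -1, yA + -1 + 0) = true) := by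
      simp only [List.contains_iff_mem, hmem]
      simp only [Ahead]; norm_num; try omega
    rw [if_neg hc]
    have hb : ((rem - 1 == (0 : Int)) = true) := by simp only [beq_iff_eq]; omega
    rw [if_pos hb]
    have hL : ((PySem.Int.mod (turns + 1) 2 == (0 : Int)) = true) := by
      rw [hmod]; simp only [beq_iff_eq]; omega
    rw [hL]
    simp only [if_true]
    refine ⟨rfl, rfl, rfl, by omega, by omega, by omega, lox, hix, loy - 1, hiy,
      by omega, by omega, by omega, by omega, by omega, by omega, by omega,
      Or.inl (by omega), ?_⟩
    intro px py
    rw [valsUpTo_succ _ m _ hm2 hget, valsUpTo_insert_high _ m m _ le_rfl]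
    simp only [List.mem_append, List.mem_singleton, Prod.mk.injEq, hmem]
    simp only [Ahead]; norm_num; try omega
  -- ===== direction (0,-1), rem ≥ 2 : keep going down =====
  · have hc : ((valsUpTo m dA).contains (xA + 0 + - -1, yA + -1 + 0) = true) := by
      simp only [List.contains_iff_mem, hmem]
      refine ⟨by omega, by omega, by omega, by omega, ?_⟩
      simp only [Ahead]; norm_num; try omega
    rw [if_pos hc]
    have hb : ((rem - 1 == (0 : Int)) = false) := by simp only [beq_eq_false_iff_ne, ne_eq]; omega
    rw [hb]
    simp only [Bool.false_eq_true, if_false]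
    refine ⟨rfl, rfl, rfl, rfl, rfl, by omega, lox, hix, loy, hiy,
      by omega, by omega, by omega, by omega, by omega, by omega, by omega,
      Or.inr (Or.inr (Or.inr (by omega))), ?_⟩
    intro px py
    rw [valsUpTo_succ _ m _ hm2 hget, valsUpTo_insert_high _ m m _ le_rfl]
    simp only [List.mem_append, List.mem_singleton, Prod.mk.injEq, hmem]
    simp only [Ahead]; norm_num; try omega

lemma fold_inv (k : Nat) : ∀ (a b : Int) (sA : StA) (sB : StB), (b - a).toNat = k →
    LoopInv (a - 1) sA sB →
    ∃ m, LoopInv m ((PySem.List.pyRange a b 1).foldl stepA sA) ((PySem.List.pyRange a b 1).foldl stepB sB) := by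
  induction k with
  | zero =>
    intro a b sA sB hk h
    have hnil : PySem.List.pyRange a b 1 = [] := by
      rw [PySem.List.pyRange_one, hk]
      simp
    rw [hnil]
    exact ⟨a - 1, h⟩
  | succ k ih =>
    intro a b sA sB hk h
    have hab : a < b := by omega
    rw [PySem.List.pyRange_one_cons hab]
    simp only [List.foldl_cons]
    refine ih (a + 1) b _ _ (by omega) ?_
    have e : a + 1 - 1 = a := by ring
    rw [e]
    exact step_inv a sA sB h

-- ---- ghost walker ⇒ B's staged construction ----

-- direction of leg j
def dir (j : Nat) : Int × Int := pvDirs.getD (j % 4) (0, 0)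

-- the per-step unfolding of the schedule: k directions, current leg j, rem steps left in it
def dirStream : Nat → Nat → Nat → List (Int × Int)
  | 0, _, _ => []
  | k + 1, j, rem =>
    dir j :: (if rem = 1 then dirStream k (j + 1) ((j + 1) / 2 + 1) else dirStream k j (rem - 1))

lemma dir_succ (j : Nat) : dir (j + 1) = (-(dir j).2, (dir j).1) := by
  have h4 : j % 4 = 0 ∨ j % 4 = 1 ∨ j % 4 = 2 ∨ j % 4 = 3 := by omega
  have h5 : (j + 1) % 4 = (j % 4 + 1) % 4 := by omega
  rcases h4 with h | h | h | h <;> simp [dir, pvDirs, h, h5]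

lemma dirStream_leg (rem : Nat) : ∀ (k j : Nat), 1 ≤ rem →
    dirStream k j rem =
      List.replicate (min rem k) (dir j) ++ dirStream (k - min rem k) (j + 1) ((j + 1) / 2 + 1) := by
  induction rem with
  | zero => intro k j h; omega
  | succ r ih =>
    intro k j _
    cases k with
    | zero => simp [dirStream]
    | succ k =>
      cases Nat.eq_zero_or_pos r with
      | inl h0 =>
        subst h0
        simp [dirStream]
      | inr hr =>
        have h1 : ¬ (r + 1 = 1) := by omega
        have hmin : min (r + 1) (k + 1) = min r k + 1 := by omega
        have hsub : k + 1 - min (r + 1) (k + 1) = k - min r k := by omega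
        simp only [dirStream, if_neg h1, Nat.add_sub_cancel]
        rw [ih k j hr, hsub, hmin, List.replicate_succ, List.cons_append]

lemma dirStream_eq_buildSteps (fuel : Nat) : ∀ (k j : Nat), k ≤ fuel →
    dirStream k j (j / 2 + 1) = buildSteps fuel j k := by
  induction fuel with
  | zero =>
    intro k j hk
    have h0 : k = 0 := by omega
    subst h0
    simp [dirStream, buildSteps]
  | succ fuel ih =>
    intro k j hk
    cases Nat.eq_zero_or_pos k with
    | inl h0 => subst h0; simp [dirStream, buildSteps]
    | inr hkpos =>
      rw [dirStream_leg (j / 2 + 1) k j (by omega),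
        ih (k - min (j / 2 + 1) k) (j + 1) (by omega)]
      simp only [buildSteps, if_neg (by omega : ¬ k = 0), dir]

-- one unfolding of the staged dict build along a scanl
lemma insertSeq_scanl_cons (d : PySem.Dict Int (Int × Int)) (a : Int) (p s : Int × Int)
    (l : List (Int × Int)) :
    (PySem.List.enumerate ((List.scanl (fun p q => (p.1 + q.1, p.2 + q.2)) p (s :: l)).tail) a).foldl
        (fun d p => d.insert p.1 p.2) d
      = (PySem.List.enumerate
          ((List.scanl (fun p q => (p.1 + q.1, p.2 + q.2)) (p.1 + s.1, p.2 + s.2) l).tail) (a + 1)).foldl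
          (fun d p => d.insert p.1 p.2) (d.insert a (p.1 + s.1, p.2 + s.2)) := by
  cases l <;> simp [List.scanl, PySem.List.enumerate_cons]

-- the ghost walker's dict is the staged dict over the per-step schedule
lemma ghost_dict (k : Nat) : ∀ (a : Int) (d : PySem.Dict Int (Int × Int)) (x y : Int) (j rem : Nat),
    1 ≤ rem →
    ((PySem.List.pyRange a (a + k) 1).foldl stepB
        (d, x, y, (dir j).1, (dir j).2, ((j / 2 + 1 : Nat) : Int), ((rem : Nat) : Int), ((j : Nat) : Int))).1
      = (PySem.List.enumerate
          ((List.scanl (fun p q => (p.1 + q.1, p.2 + q.2)) (x, y) (dirStream k j rem)).tail) a).foldl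
          (fun d p => d.insert p.1 p.2) d := by
  induction k with
  | zero =>
    intro a d x y j rem hrem
    have hnil : PySem.List.pyRange a (a + ((0 : Nat) : Int)) 1 = [] := by
      rw [PySem.List.pyRange_one]; simp
    rw [hnil]
    simp [dirStream, List.scanl]
  | succ k ih =>
    intro a d x y j rem hrem
    have hcons : PySem.List.pyRange a (a + (k + 1 : Nat)) 1
        = a :: PySem.List.pyRange (a + 1) (a + (k + 1 : Nat)) 1 := by
      exact PySem.List.pyRange_one_cons (by push_cast; omega)
    have hrange : a + ((k + 1 : Nat) : Int) = (a + 1) + (k : Nat) := by push_cast; ring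
    rw [hcons, hrange]
    simp only [List.foldl_cons]
    by_cases h1 : rem = 1
    · -- end of the leg: the walker turns; the stream starts leg j+1
      subst h1
      have hstep : stepB (d, x, y, (dir j).1, (dir j).2, ((j / 2 + 1 : Nat) : Int), ((1 : Nat) : Int), ((j : Nat) : Int)) a
          = (d.insert a (x + (dir j).1, y + (dir j).2), x + (dir j).1, y + (dir j).2,
             (dir (j + 1)).1, (dir (j + 1)).2, (((j + 1) / 2 + 1 : Nat) : Int),
             (((j + 1) / 2 + 1 : Nat) : Int), ((j + 1 : Nat) : Int)) := by
        simp only [stepB]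
        have hb : ((((1 : Nat) : Int) - 1 == (0 : Int)) = true) := by simp
        rw [if_pos hb]
        have hmod : PySem.Int.mod (((j : Nat) : Int) + 1) 2 = (((j : Nat) : Int) + 1) % 2 :=
          PySem.Int.mod_eq_emod_of_pos (by norm_num)
        have hseg : (if (PySem.Int.mod (((j : Nat) : Int) + 1) 2 == 0) = true
            then ((j / 2 + 1 : Nat) : Int) + 1 else ((j / 2 + 1 : Nat) : Int))
            = (((j + 1) / 2 + 1 : Nat) : Int) := by
          rw [hmod]
          by_cases hp : (j + 1) % 2 = 0
          · rw [if_pos (by simp only [beq_iff_eq]; omega)]; push_cast; omega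
          · rw [if_neg (by simp only [beq_iff_eq]; omega)]; push_cast; omega
        rw [dir_succ j]
        simp only [hseg]
        have ht : ((j : Nat) : Int) + 1 = ((j + 1 : Nat) : Int) := by push_cast; ring
        rw [ht]
      rw [hstep]
      have hds : dirStream (k + 1) j 1 = dir j :: dirStream k (j + 1) ((j + 1) / 2 + 1) := by
        simp [dirStream]
      rw [hds, insertSeq_scanl_cons]
      exact ih (a + 1) (d.insert a (x + (dir j).1, y + (dir j).2))
        (x + (dir j).1) (y + (dir j).2) (j + 1) ((j + 1) / 2 + 1) (by omega)
    · -- mid-leg: the walker keeps its direction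
      have hstep : stepB (d, x, y, (dir j).1, (dir j).2, ((j / 2 + 1 : Nat) : Int), ((rem : Nat) : Int), ((j : Nat) : Int)) a
          = (d.insert a (x + (dir j).1, y + (dir j).2), x + (dir j).1, y + (dir j).2,
             (dir j).1, (dir j).2, ((j / 2 + 1 : Nat) : Int),
             ((rem - 1 : Nat) : Int), ((j : Nat) : Int)) := by
        simp only [stepB]
        have hb : ((((rem : Nat) : Int) - 1 == (0 : Int)) = false) := by
          simp only [beq_eq_false_iff_ne, ne_eq]; omega
        rw [hb]
        simp only [Bool.false_eq_true, if_false]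
        have hr : ((rem : Nat) : Int) - 1 = ((rem - 1 : Nat) : Int) := by push_cast [hrem]; ring
        rw [hr]
      rw [hstep]
      have hds : dirStream (k + 1) j rem = dir j :: dirStream k j (rem - 1) := by
        simp [dirStream, h1]
      rw [hds, insertSeq_scanl_cons]
      exact ih (a + 1) (d.insert a (x + (dir j).1, y + (dir j).2))
        (x + (dir j).1) (y + (dir j).2) j (rem - 1) (by omega)

-- ===== VERDICT (by name: the statement is the Claim_ definition above) =====
theorem project_2d_ulam_spec : Claim_equal_project_2d_ulam := by
  unfold Claim_equal_project_2d_ulam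
  intro primes limit _
  unfold Spec_project_2d_ulam
  unfold project_2d_ulam project_2d_ulam_alt
  set k := (limit - 1).toNat with hk
  -- A's dict equals the ghost walker's dict (geometric invariant)
  obtain ⟨m, hm⟩ := fold_inv (limit + 1 - 2).toNat 2 (limit + 1) initA initB rfl
    (by rw [show (2 : Int) - 1 = 1 by ring]; exact init_inv)
  have hAG : ((PySem.List.pyRange 2 (limit + 1) 1).foldl stepA initA).1
      = ((PySem.List.pyRange 2 (limit + 1) 1).foldl stepB initB).1 :=
    LoopInv_dict_eq m _ _ hm
  -- the ghost walker's dict equals B's staged dict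
  have hrange : PySem.List.pyRange 2 (limit + 1) 1 = PySem.List.pyRange 2 (2 + (k : Int)) 1 := by
    rw [PySem.List.pyRange_one, PySem.List.pyRange_one]
    have : (limit + 1 - 2).toNat = ((2 : Int) + (k : Int) - 2).toNat := by omega
    rw [this]
  have hinit : initB = ((PySem.Dict.empty : PySem.Dict Int (Int × Int)).insert 1 (0, 0), 0, 0,
      (dir 0).1, (dir 0).2, ((0 / 2 + 1 : Nat) : Int), ((1 : Nat) : Int), ((0 : Nat) : Int)) := by
    simp [initB, dir, pvDirs]
  have hGB : ((PySem.List.pyRange 2 (limit + 1) 1).foldl stepB initB).1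
      = (PySem.List.enumerate
          ((List.scanl (fun p q => (p.1 + q.1, p.2 + q.2)) ((0, 0) : Int × Int) (buildSteps k 0 k)).tail) 2).foldl
          (fun d p => d.insert p.1 p.2) ((PySem.Dict.empty : PySem.Dict Int (Int × Int)).insert 1 (0, 0)) := by
    rw [hrange, hinit, ghost_dict k 2 _ 0 0 0 1 (by omega),
      show dirStream k 0 1 = buildSteps k 0 k from dirStream_eq_buildSteps k k 0 le_rfl]
  -- B's staged dict: peel off the head (0,0) of the scanl
  have hB : (PySem.List.enumerate
        (List.scanl (fun p q => (p.1 + q.1, p.2 + q.2)) ((0, 0) : Int × Int) (buildSteps k 0 k)) 1).foldl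
        (fun d p => d.insert p.1 p.2) (PySem.Dict.empty : PySem.Dict Int (Int × Int))
      = (PySem.List.enumerate
          ((List.scanl (fun p q => (p.1 + q.1, p.2 + q.2)) ((0, 0) : Int × Int) (buildSteps k 0 k)).tail) 2).foldl
          (fun d p => d.insert p.1 p.2) ((PySem.Dict.empty : PySem.Dict Int (Int × Int)).insert 1 (0, 0)) := by
    generalize buildSteps k 0 k = l
    cases l <;> simp [List.scanl, PySem.List.enumerate_cons]
  have hdicts : ((PySem.List.pyRange 2 (limit + 1) 1).foldl stepA initA).1
      = (PySem.List.enumerate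
          (List.scanl (fun p q => (p.1 + q.1, p.2 + q.2)) ((0, 0) : Int × Int) (buildSteps k 0 k)) 1).foldl
          (fun d p => d.insert p.1 p.2) (PySem.Dict.empty : PySem.Dict Int (Int × Int)) := by
    rw [hAG, hGB, hB]
  simp only [hdicts, PySem.Dict.getD_eq_get?_getD]
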